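-- pv_equiv track=rewrite | github.com/hjamet/Article_Net2 | Tools/Find_Pattern.py | ft_conclude
-- ===== SOURCE A (Python) =====
-- def ft_conclude(Pattern, especes_possibles):
--     """Retourne un dictionnaire de la liste des cases pouvant être en haut à droite du pattern si la case de coords x,y est de type 'type'; espece_possible est une liste de tous les noms d'espece possibles, ! Suivi du nom de l'espece ne dvant pas se trouver à cet emplacement (Inclus dans ft_find_pattern)"""
--     output = {}
--     for espece in especes_possibles:
--         output[espece] = []
--         for x in range(len(Pattern)):
--             for y in range(len(Pattern[0])):
--                 if Pattern[x][y] != espece and Pattern[x][y] != '?' and Pattern[x][y][0] != '!' or Pattern[x][y][0] == '!' and Pattern[x][y][1:] == espece: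
--                     output[espece].append((-x, -y))
--     return output
-- ===== SOURCE B (Python) =====
-- def ft_conclude(Pattern, especes_possibles):
--     """Single classifying pass over the grid: for each cell decide which species
--     may have their top-right corner there, instead of rescanning the grid per species."""
--     output = {espece: [] for espece in especes_possibles}
--     if not output:
--         return output
--     width = len(Pattern[0]) if Pattern else 0
--     for x in range(len(Pattern)):
--         for y in range(width):
--             v = Pattern[x][y]
--             if v == '?':
--                 continue
--             if v.startswith('!'):
--                 s = v[1:]
--                 if s in output:
--                     output[s].append((-x, -y))
--             else:
--                 for espece in output:
--                     if espece != v: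
--                         output[espece].append((-x, -y))
--     return output
-- ===== Notes on version B (the rewrite author's own statement) =====
-- stated objective: alternative
-- what changed: Replaces A's per-species repeated full-grid scans (species loop outermost, re-testing the 4-clause condition for every (species, cell) pair) by a single classifying pass over the grid that dispatches each cell once: '?' is skipped, '!name' appends to exactly one species list, any other value appends to every species but itself.
import Mathlib
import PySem

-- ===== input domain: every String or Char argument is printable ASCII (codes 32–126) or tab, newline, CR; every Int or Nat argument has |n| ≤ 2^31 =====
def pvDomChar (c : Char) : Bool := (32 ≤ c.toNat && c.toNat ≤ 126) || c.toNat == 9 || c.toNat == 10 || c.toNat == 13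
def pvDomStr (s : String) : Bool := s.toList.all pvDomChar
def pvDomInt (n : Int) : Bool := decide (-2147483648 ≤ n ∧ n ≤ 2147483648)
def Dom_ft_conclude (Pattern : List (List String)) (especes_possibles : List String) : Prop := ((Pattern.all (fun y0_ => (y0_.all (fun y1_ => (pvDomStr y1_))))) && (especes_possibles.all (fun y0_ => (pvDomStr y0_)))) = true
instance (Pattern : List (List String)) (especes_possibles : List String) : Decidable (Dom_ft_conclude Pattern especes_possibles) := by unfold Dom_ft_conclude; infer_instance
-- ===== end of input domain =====

-- ===== PORT A =====
-- A's big or/and condition on a cell value v and a species name, as Python evaluates it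
-- (v[0] ported by PySem.Str.pyGet?: none where Python raises IndexError — excluded by Pre_).
def ftCondA (v espece : String) : Bool :=
  (v != espece && v != "?" && PySem.Str.pyGet? v 0 != some '!')
  || (PySem.Str.pyGet? v 0 == some '!' && PySem.Str.slice v (some 1) none == espece)

def ft_conclude (Pattern : List (List String)) (especes_possibles : List String) : List (String × List (Int × Int)) :=
  (especes_possibles.foldl (fun output espece =>
    ((PySem.List.pyRange 0 Pattern.length 1).foldl (fun output x =>
      (PySem.List.pyRange 0 ((PySem.List.pyGetD Pattern 0 []).length) 1).foldl (fun output y =>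
        if ftCondA (PySem.List.pyGetD (PySem.List.pyGetD Pattern x []) y "") espece then
          output.modify espece [] (fun l => l ++ [(-x, -y)])
        else output)
      output)
    (output.insert espece ([] : List (Int × Int)))))
  (PySem.Dict.empty : PySem.Dict String (List (Int × Int)))).items

-- ===== PORT B =====
-- one step of B's single classifying pass, for the cell at (x, y) holding value v
def ftStepB (output : PySem.Dict String (List (Int × Int))) (c : (Int × Int) × String) :
    PySem.Dict String (List (Int × Int)) :=
  if c.2 == "?" then output
  else if PySem.Str.startswith c.2 "!" then
    (if output.contains (PySem.Str.slice c.2 (some 1) none) then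
      output.modify (PySem.Str.slice c.2 (some 1) none) [] (fun l => l ++ [c.1])
    else output)
  else
    output.keys.foldl (fun d espece => if espece != c.2 then d.modify espece [] (fun l => l ++ [c.1]) else d) output

def ft_conclude_alt (Pattern : List (List String)) (especes_possibles : List String) : List (String × List (Int × Int)) :=
  let output0 : PySem.Dict String (List (Int × Int)) :=
    especes_possibles.foldl (fun d e => d.insert e ([] : List (Int × Int))) PySem.Dict.empty
  if output0.size = 0 then output0.items
  else
    let width : Nat := if Pattern.isEmpty then 0 else (PySem.List.pyGetD Pattern 0 []).length
    ((PySem.List.pyRange 0 Pattern.length 1).foldl (fun output x =>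
      (PySem.List.pyRange 0 width 1).foldl (fun output y =>
        ftStepB output ((-x, -y), PySem.List.pyGetD (PySem.List.pyGetD Pattern x []) y ""))
      output) output0).items

-- ===== PRECONDITION & SPEC =====
-- Pre_ excludes exactly the inputs where Python A raises IndexError: with a nonempty species
-- list, every row must be at least as long as row 0 (A indexes each row up to len(Pattern[0]))
-- and every cell read must be a nonempty string (A evaluates cell[0]).
def Pre_ft_conclude (Pattern : List (List String)) (especes_possibles : List String) : Prop :=
  especes_possibles = [] ∨
    ∀ row ∈ Pattern, (Pattern.headD []).length ≤ row.length ∧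
      ∀ s ∈ row.take (Pattern.headD []).length, s ≠ ""
instance (Pattern : List (List String)) (especes_possibles : List String) : Decidable (Pre_ft_conclude Pattern especes_possibles) := by unfold Pre_ft_conclude; infer_instance

def pvWitness_ft_conclude : List (List String) × List String := ([["a", "?"], ["!b", "b"]], ["a", "b"])

def Spec_ft_conclude (Pattern : List (List String)) (especes_possibles : List String) (out : List (String × List (Int × Int))) : Prop := out = ft_conclude_alt Pattern especes_possibles
instance (Pattern : List (List String)) (especes_possibles : List String) (out : List (String × List (Int × Int))) : Decidable (Spec_ft_conclude Pattern especes_possibles out) := by unfold Spec_ft_conclude; infer_instance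

-- ===== CLAIM (what is proved, stated in full; the proofs are below) =====
def Claim_equal_ft_conclude : Prop := ∀ (Pattern : List (List String)) (especes_possibles : List String), Dom_ft_conclude Pattern especes_possibles → Pre_ft_conclude Pattern especes_possibles → Spec_ft_conclude Pattern especes_possibles (ft_conclude Pattern especes_possibles)

-- ===== LEMMAS AND PROOFS =====

-- the grid cells A and B both visit, in scan order, paired with the point they contribute
def ftCells (P : List (List String)) : List ((Int × Int) × String) :=
  (PySem.List.pyRange 0 P.length 1).flatMap (fun x =>
    (PySem.List.pyRange 0 ((PySem.List.pyGetD P 0 []).length) 1).map (fun y =>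
      ((-x, -y), PySem.List.pyGetD (PySem.List.pyGetD P x []) y "")))

-- the list A builds for one species
def ftVal (P : List (List String)) (e : String) : List (Int × Int) :=
  ((ftCells P).filter (fun c => ftCondA c.2 e)).map (·.1)

-- A's per-species body, as a single fold over the cell list
def ftStepA (P : List (List String)) (d : PySem.Dict String (List (Int × Int))) (e : String) :
    PySem.Dict String (List (Int × Int)) :=
  (ftCells P).foldl (fun d c => if ftCondA c.2 e then d.modify e [] (fun l => l ++ [c.1]) else d)
    (d.insert e ([] : List (Int × Int)))

lemma foldl_flatMap {α β γ : Type} (l : List α) (f : α → List β) (g : γ → β → γ) (init : γ) :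
    (l.flatMap f).foldl g init = l.foldl (fun acc x => (f x).foldl g acc) init := by
  induction l generalizing init with
  | nil => rfl
  | cons a l ih => simp [List.flatMap_cons, List.foldl_append, ih]

lemma foldl_fun_ext {γ α : Type} (f g : γ → α → γ) (h : ∀ a x, f a x = g a x) (l : List α)
    (init : γ) : l.foldl f init = l.foldl g init := by
  have : f = g := funext fun a => funext fun x => h a x
  rw [this]

-- A's literal double loop is the cell-list fold
lemma ftA_body_eq (P : List (List String)) (d : PySem.Dict String (List (Int × Int))) (e : String) :
    ((PySem.List.pyRange 0 P.length 1).foldl (fun output x =>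
      (PySem.List.pyRange 0 ((PySem.List.pyGetD P 0 []).length) 1).foldl (fun output y =>
        if ftCondA (PySem.List.pyGetD (PySem.List.pyGetD P x []) y "") e then
          output.modify e [] (fun l => l ++ [(-x, -y)])
        else output)
      output)
    (d.insert e ([] : List (Int × Int)))) = ftStepA P d e := by
  unfold ftStepA ftCells
  rw [foldl_flatMap]
  refine foldl_fun_ext _ _ (fun acc x => ?_) _ _
  rw [List.foldl_map]

-- a fold that conditionally appends at ONE fixed existing key
lemma foldl_modify_one (e : String) (p : ((Int × Int) × String) → Bool) :
    ∀ (l : List ((Int × Int) × String)) (d : PySem.Dict String (List (Int × Int))),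
      e ∈ d.keys →
      (((l.foldl (fun d c => if p c then d.modify e [] (fun L => L ++ [c.1]) else d) d).keys = d.keys) ∧
       ∀ e', (l.foldl (fun d c => if p c then d.modify e [] (fun L => L ++ [c.1]) else d) d).getD e' []
          = if e' = e then d.getD e [] ++ (l.filter p).map (·.1) else d.getD e' []) := by
  intro l
  induction l with
  | nil => intro d _; simp
  | cons c l ih =>
    intro d he
    by_cases hp : p c = true
    · have hc : d.contains e = true := (PySem.Dict.contains_iff_mem_keys ..).mpr he
      have hk : (d.modify e [] (fun L => L ++ [c.1])).keys = d.keys := by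
        rw [PySem.Dict.keys_modify, PySem.Dict.keys_insert_of_contains _ _ hc]
      have he' : e ∈ (d.modify e [] (fun L => L ++ [c.1])).keys := hk ▸ he
      obtain ⟨ihk, ihv⟩ := ih (d.modify e [] (fun L => L ++ [c.1])) he'
      refine ⟨?_, fun e' => ?_⟩
      · rw [List.foldl_cons, if_pos hp, ihk, hk]
      · rw [List.foldl_cons, if_pos hp, ihv e']
        by_cases h : e' = e
        · subst h
          rw [if_pos rfl, if_pos rfl, PySem.Dict.getD_modify, if_pos rfl]
          simp [hp]
        · rw [if_neg h, if_neg h, PySem.Dict.getD_modify, if_neg h]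
    · obtain ⟨ihk, ihv⟩ := ih d he
      refine ⟨by rw [List.foldl_cons, if_neg hp, ihk], fun e' => ?_⟩
      rw [List.foldl_cons, if_neg hp, ihv e']
      simp [hp]

lemma ftStepA_inv (P : List (List String)) (d : PySem.Dict String (List (Int × Int))) (e : String) :
    (ftStepA P d e).keys = (d.insert e ([] : List (Int × Int))).keys ∧
    (ftStepA P d e).getD e [] = ftVal P e ∧
    (∀ e', e' ≠ e → (ftStepA P d e).getD e' [] = d.getD e' []) := by
  have he : e ∈ (d.insert e ([] : List (Int × Int))).keys := by
    rw [PySem.Dict.mem_keys_insert]; exact Or.inl rfl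
  obtain ⟨hk, hv⟩ := foldl_modify_one e (fun c => ftCondA c.2 e) (ftCells P)
      (d.insert e ([] : List (Int × Int))) he
  unfold ftStepA ftVal
  refine ⟨hk, ?_, fun e' hne => ?_⟩
  · rw [hv e, if_pos rfl, PySem.Dict.getD_insert_self]; rfl
  · rw [hv e', if_neg hne, PySem.Dict.getD_insert_of_ne _ _ _ hne]

-- invariant of A's outer species loop
lemma ftA_fold_inv (P : List (List String)) :
    ∀ (es : List String) (d : PySem.Dict String (List (Int × Int))),
      ((es.foldl (ftStepA P) d).keys
        = (es.foldl (fun d e => d.insert e ([] : List (Int × Int))) d).keys) ∧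
      (∀ e ∈ es, (es.foldl (ftStepA P) d).getD e [] = ftVal P e) ∧
      (∀ e', e' ∉ es → (es.foldl (ftStepA P) d).getD e' [] = d.getD e' []) := by
  intro es
  induction es with
  | nil => intro d; simp
  | cons a es ih =>
    intro d
    obtain ⟨hka, hva, hvn⟩ := ftStepA_inv P d a
    obtain ⟨ihk, ihv, ihn⟩ := ih (ftStepA P d a)
    refine ⟨?_, fun e hmem => ?_, fun e' hne => ?_⟩
    · simp only [List.foldl_cons]
      rw [ihk, PySem.Dict.keys_foldl_insert, PySem.Dict.keys_foldl_insert, hka]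
    · simp only [List.foldl_cons]
      rcases List.mem_cons.mp hmem with h | h
      · by_cases hes : e ∈ es
        · exact ihv e hes
        · rw [ihn e hes, h, hva]
      · exact ihv e h
    · simp only [List.foldl_cons]
      have h1 : e' ∉ es := fun h => hne (List.mem_cons_of_mem _ h)
      have h2 : e' ≠ a := fun h => hne (h ▸ List.mem_cons_self ..)
      rw [ihn e' h1, hvn e' h2]

-- ftCondA on the three kinds of cell values B distinguishes
lemma ftCondA_q (e : String) : ftCondA "?" e = false := by
  simp [ftCondA]

lemma ftCondA_bang (v e : String) (h : PySem.Str.startswith v "!" = true) :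
    ftCondA v e = (PySem.Str.slice v (some 1) none == e) := by
  have hpre := (PySem.Chars.startswith_iff (s := v.toList) (p := "!".toList)).mp (by simpa using h)
  obtain ⟨t, ht⟩ := hpre
  have hlist : v.toList = '!' :: t := by simpa using ht.symm
  have hget : PySem.List.pyGet? v.toList 0 = some '!' := by
    rw [hlist, PySem.List.pyGet?_zero]; rfl
  simp [ftCondA, hget]

lemma ftCondA_plain (v e : String) (h1 : v ≠ "?") (h2 : PySem.Str.startswith v "!" = false) :
    ftCondA v e = (v != e) := by
  have hget : PySem.List.pyGet? v.toList 0 ≠ some '!' := by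
    intro hc
    rcases hv : v.toList with _ | ⟨c0, t⟩
    · rw [hv, PySem.List.pyGet?_zero] at hc; simp at hc
    · rw [hv, PySem.List.pyGet?_zero] at hc
      have hc0 : c0 = '!' := by simpa using hc
      have hsw : PySem.Str.startswith v "!" = true := by
        have : ("!".toList : List Char) <+: v.toList := ⟨t, by simp [hv, hc0]⟩
        simpa using (PySem.Chars.startswith_iff (s := v.toList) (p := "!".toList)).mpr this
      exact absurd (h2.symm.trans hsw) Bool.false_ne_true
  have hbeq : (PySem.List.pyGet? v.toList 0 == some '!') = false := beq_eq_false_iff_ne.mpr hget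
  have hbne : (PySem.List.pyGet? v.toList 0 != some '!') = true := by simp [bne, hbeq]
  simp [ftCondA, hbeq, hbne, h1]

-- the per-cell broadcast fold of B's "ordinary value" branch
lemma foldl_keys_modify (v : String) (pt : Int × Int) :
    ∀ (ks : List String) (d : PySem.Dict String (List (Int × Int))), ks.Nodup →
      (∀ k ∈ ks, k ∈ d.keys) →
      (((ks.foldl (fun d e => if e != v then d.modify e [] (fun l => l ++ [pt]) else d) d).keys = d.keys) ∧
       ∀ e', (ks.foldl (fun d e => if e != v then d.modify e [] (fun l => l ++ [pt]) else d) d).getD e' []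
          = d.getD e' [] ++ (if e' ∈ ks ∧ e' ≠ v then [pt] else [])) := by
  intro ks
  induction ks with
  | nil => intro d _ _; simp
  | cons k ks ih =>
    intro d hnd hsub
    have hkd : k ∈ d.keys := hsub k (List.mem_cons_self ..)
    have hnd' : ks.Nodup := hnd.of_cons
    have hknot : k ∉ ks := (List.nodup_cons.mp hnd).1
    by_cases hkv : k = v
    · have hne : ¬((k != v) = true) := by simp [hkv]
      obtain ⟨ihk, ihv⟩ := ih d hnd' (fun x hx => hsub x (List.mem_cons_of_mem _ hx))
      refine ⟨by rw [List.foldl_cons, if_neg hne, ihk], fun e' => ?_⟩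
      rw [List.foldl_cons, if_neg hne, ihv e']
      congr 1
      by_cases hev : e' = v
      · simp [hev]
      · have hek : e' ≠ k := fun h => hev (h.trans hkv)
        simp [List.mem_cons, hek, hev]
    · have hne : (k != v) = true := by simp [hkv]
      have hc : d.contains k = true := (PySem.Dict.contains_iff_mem_keys ..).mpr hkd
      have hk1 : (d.modify k [] (fun l => l ++ [pt])).keys = d.keys := by
        rw [PySem.Dict.keys_modify, PySem.Dict.keys_insert_of_contains _ _ hc]
      obtain ⟨ihk, ihv⟩ := ih (d.modify k [] (fun l => l ++ [pt])) hnd'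
        (fun x hx => hk1 ▸ hsub x (List.mem_cons_of_mem _ hx))
      refine ⟨by rw [List.foldl_cons, if_pos hne, ihk, hk1], fun e' => ?_⟩
      rw [List.foldl_cons, if_pos hne, ihv e', PySem.Dict.getD_modify]
      by_cases hek : e' = k
      · subst hek
        rw [if_pos rfl, if_neg (by simp [hknot]), if_pos ⟨List.mem_cons_self .., hkv⟩]
        simp
      · rw [if_neg hek]
        congr 1
        simp [List.mem_cons, hek]

-- one B step appends the cell's point to exactly the keys satisfying A's condition
lemma ftStepB_inv (d : PySem.Dict String (List (Int × Int))) (hnd : d.keys.Nodup)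
    (c : (Int × Int) × String) :
    ((ftStepB d c).keys = d.keys) ∧
    ∀ e', (ftStepB d c).getD e' []
        = d.getD e' [] ++ (if e' ∈ d.keys ∧ ftCondA c.2 e' then [c.1] else []) := by
  by_cases hq : c.2 = "?"
  · have h1 : (c.2 == "?") = true := by simp [hq]
    constructor
    · unfold ftStepB; rw [if_pos h1]
    · intro e'
      unfold ftStepB; rw [if_pos h1, hq, ftCondA_q]
      simp
  · have h1 : ¬((c.2 == "?") = true) := by simp [hq]
    by_cases hb : PySem.Str.startswith c.2 "!" = true
    · have hcond : ∀ e', ftCondA c.2 e' = (PySem.Str.slice c.2 (some 1) none == e') :=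
        fun e' => ftCondA_bang c.2 e' hb
      by_cases hcont : d.contains (PySem.Str.slice c.2 (some 1) none) = true
      · have hmem : PySem.Str.slice c.2 (some 1) none ∈ d.keys :=
          (PySem.Dict.contains_iff_mem_keys ..).mp hcont
        constructor
        · unfold ftStepB; rw [if_neg h1, if_pos hb, if_pos hcont]
          rw [PySem.Dict.keys_modify, PySem.Dict.keys_insert_of_contains _ _ hcont]
        · intro e'
          unfold ftStepB; rw [if_neg h1, if_pos hb, if_pos hcont, hcond e',
            PySem.Dict.getD_modify]
          by_cases he : e' = PySem.Str.slice c.2 (some 1) none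
          · subst he
            rw [if_pos rfl, if_pos ⟨hmem, by simp⟩]
          · rw [if_neg he, if_neg (by rintro ⟨-, hbe⟩; exact he (beq_iff_eq.mp hbe).symm)]
            simp
      · constructor
        · unfold ftStepB; rw [if_neg h1, if_pos hb, if_neg hcont]
        · intro e'
          unfold ftStepB; rw [if_neg h1, if_pos hb, if_neg hcont, hcond e']
          rw [if_neg (by
            rintro ⟨hm', hbe⟩
            exact hcont ((PySem.Dict.contains_iff_mem_keys ..).mpr (by
              rw [beq_iff_eq.mp hbe]; exact hm')))]
          simp
    · have hb' : PySem.Str.startswith c.2 "!" = false := by simpa using hb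
      have hcond : ∀ e', ftCondA c.2 e' = (c.2 != e') := fun e' => ftCondA_plain c.2 e' hq hb'
      obtain ⟨hk, hv⟩ := foldl_keys_modify c.2 c.1 d.keys d hnd (fun k hk => hk)
      constructor
      · unfold ftStepB; rw [if_neg h1, if_neg (by rw [hb']; exact Bool.false_ne_true)]
        exact hk
      · intro e'
        unfold ftStepB; rw [if_neg h1, if_neg (by rw [hb']; exact Bool.false_ne_true), hv e', hcond e']
        congr 1
        by_cases hm : e' ∈ d.keys
        · by_cases hev : e' = c.2
          · rw [if_neg (by rintro ⟨-, h⟩; exact h hev), if_neg (by rintro ⟨-, h⟩; simp [hev] at h)]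
          · rw [if_pos ⟨hm, hev⟩, if_pos ⟨hm, bne_iff_ne.mpr (fun h => hev h.symm)⟩]
        · rw [if_neg (by rintro ⟨h, -⟩; exact hm h), if_neg (by rintro ⟨h, -⟩; exact hm h)]

-- invariant of B's single pass over the cells
lemma ftB_fold_inv :
    ∀ (l : List ((Int × Int) × String)) (d : PySem.Dict String (List (Int × Int))), d.keys.Nodup →
      ((l.foldl ftStepB d).keys = d.keys) ∧
      ∀ e', (l.foldl ftStepB d).getD e' []
          = d.getD e' [] ++ (if e' ∈ d.keys then ((l.filter (fun c => ftCondA c.2 e')).map (·.1)) else []) := by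
  intro l
  induction l with
  | nil => intro d _; simp
  | cons c l ih =>
    intro d hnd
    obtain ⟨hk, hv⟩ := ftStepB_inv d hnd c
    obtain ⟨ihk, ihv⟩ := ih (ftStepB d c) (hk ▸ hnd)
    refine ⟨by rw [List.foldl_cons, ihk, hk], fun e' => ?_⟩
    rw [List.foldl_cons, ihv e', hk, hv e', List.filter_cons]
    by_cases hm : e' ∈ d.keys
    · by_cases hc : ftCondA c.2 e' = true <;> simp [hm, hc]
    · simp [hm]

-- B's literal double loop is the cell-list fold
lemma ftB_pass_eq (P : List (List String)) (d : PySem.Dict String (List (Int × Int))) :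
    ((PySem.List.pyRange 0 P.length 1).foldl (fun output x =>
      (PySem.List.pyRange 0 (((if P.isEmpty then 0 else (PySem.List.pyGetD P 0 []).length) : Nat) : Int) 1).foldl (fun output y =>
        ftStepB output ((-x, -y), PySem.List.pyGetD (PySem.List.pyGetD P x []) y ""))
      output) d) = (ftCells P).foldl ftStepB d := by
  rcases P with _ | ⟨r, P'⟩
  · simp [ftCells, PySem.List.pyRange_one_eq_nil]
  · unfold ftCells
    rw [foldl_flatMap]
    refine foldl_fun_ext _ _ (fun acc x => ?_) _ _
    rw [List.foldl_map]
    rfl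

-- every value a fresh insert-loop stores is [], so getD with default [] gives [] everywhere
lemma getD_foldl_insert_nil :
    ∀ (es : List String) (d : PySem.Dict String (List (Int × Int))) (k : String),
      d.getD k [] = [] →
      (es.foldl (fun d e => d.insert e ([] : List (Int × Int))) d).getD k [] = [] := by
  intro es
  induction es with
  | nil => intro d k h; simpa using h
  | cons a es ih =>
    intro d k h
    refine ih _ k ?_
    rw [PySem.Dict.getD_insert]
    by_cases hk : k = a <;> simp [hk, h]

lemma mem_keys_foldl_insert_mono :
    ∀ (es : List String) (d : PySem.Dict String (List (Int × Int))) (k : String),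
      k ∈ d.keys → k ∈ (es.foldl (fun d e => d.insert e ([] : List (Int × Int))) d).keys := by
  intro es
  induction es with
  | nil => intro d k h; simpa using h
  | cons a es ih =>
    intro d k h
    exact ih _ k ((PySem.Dict.mem_keys_insert ..).mpr (Or.inr h))

lemma mem_keys_foldl_insert_of_mem :
    ∀ (es : List String) (d : PySem.Dict String (List (Int × Int))) (k : String),
      k ∈ es → k ∈ (es.foldl (fun d e => d.insert e ([] : List (Int × Int))) d).keys := by
  intro es
  induction es with
  | nil => intro d k h; simp at h
  | cons a es ih =>
    intro d k h
    rcases List.mem_cons.mp h with h | h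
    · subst h
      exact mem_keys_foldl_insert_mono es _ k ((PySem.Dict.mem_keys_insert ..).mpr (Or.inl rfl))
    · exact ih _ k h

lemma mem_es_of_mem_keys_foldl_insert :
    ∀ (es : List String) (d : PySem.Dict String (List (Int × Int))) (k : String),
      k ∈ (es.foldl (fun d e => d.insert e ([] : List (Int × Int))) d).keys →
      k ∈ d.keys ∨ k ∈ es := by
  intro es
  induction es with
  | nil => intro d k h; exact Or.inl h
  | cons a es ih =>
    intro d k h
    rcases ih _ k h with h' | h'
    · rcases (PySem.Dict.mem_keys_insert ..).mp h' with h'' | h''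
      · exact Or.inr (h'' ▸ List.mem_cons_self ..)
      · exact Or.inl h''
    · exact Or.inr (List.mem_cons_of_mem _ h')

-- ===== VERDICT (by name: the statement is the Claim_ definition above) =====
theorem ft_conclude_spec : Claim_equal_ft_conclude := by
  intro P es hdom hpre
  unfold Spec_ft_conclude
  rcases es with _ | ⟨a, es'⟩
  · rfl
  · clear hpre hdom
    set ES := a :: es' with hES
    -- A side
    have hA : ft_conclude P ES = (ES.foldl (ftStepA P) PySem.Dict.empty).items := by
      unfold ft_conclude
      rw [foldl_fun_ext _ _ (fun d e => ftA_body_eq P d e)]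
    obtain ⟨hkA, hvA, -⟩ := ftA_fold_inv P ES PySem.Dict.empty
    -- B side
    set d0 : PySem.Dict String (List (Int × Int)) :=
      ES.foldl (fun d e => d.insert e ([] : List (Int × Int))) PySem.Dict.empty with hd0
    have hmem_a : a ∈ d0.keys := mem_keys_foldl_insert_of_mem ES _ a (List.mem_cons_self ..)
    have hsz : ¬(d0.size = 0) := by
      intro h0
      have hitems : d0.items = [] := List.eq_nil_of_length_eq_zero (by
        simpa [PySem.Dict.size] using h0)
      have : d0.keys = [] := by simp [PySem.Dict.keys, hitems]
      rw [this] at hmem_a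
      simp at hmem_a
    have hnd0 : d0.keys.Nodup := PySem.Dict.nodup_keys_foldl_insert _ _ _ (by
      simp [PySem.Dict.keys_empty])
    have hB : ft_conclude_alt P ES = ((ftCells P).foldl ftStepB d0).items := by
      unfold ft_conclude_alt
      simp only []
      rw [← hd0, if_neg hsz, ftB_pass_eq P d0]
    obtain ⟨hkB, hvB⟩ := ftB_fold_inv (ftCells P) d0 hnd0
    -- assemble
    rw [hA, hB]
    have hndA : (ES.foldl (ftStepA P) PySem.Dict.empty).keys.Nodup := by rw [hkA]; exact hnd0
    have hndB : ((ftCells P).foldl ftStepB d0).keys.Nodup := by rw [hkB]; exact hnd0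
    rw [PySem.Dict.items_eq_map_keys _ hndA ([] : List (Int × Int)),
        PySem.Dict.items_eq_map_keys _ hndB ([] : List (Int × Int)), hkA, hkB]
    refine List.map_congr_left (fun k hk => ?_)
    have hkes : k ∈ ES := by
      rcases mem_es_of_mem_keys_foldl_insert ES PySem.Dict.empty k (hd0 ▸ hk) with h | h
      · rw [PySem.Dict.keys_empty] at h; simp at h
      · exact h
    rw [hvA k hkes, hvB k]
    rw [if_pos hk, getD_foldl_insert_nil ES PySem.Dict.empty k (by simp [PySem.Dict.getD_empty])]
    rfl
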